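-- pv_equiv track=rewrite | github.com/pypi-data/pypi-mirror-403 | packages/gutenfetchen/gutenfetchen-1.2.0-py3-none-any.whl/gutenfetchen/cleaner.py | _strip_end_of_project
-- ===== SOURCE A (Python) =====
-- _END_OF_PROJECT_PREFIXES = (
--     "end of project",
--     "end of the project",
-- )
--
-- def _strip_end_of_project(lines: list[str]) -> list[str]:
--     """Remove a standalone 'End of Project' line and everything after it.
--
--     Matches lines starting with 'End of Project' or 'End of the Project'
--     (case-insensitive). Scans the last 1000 lines backward.
--     """
--     total = len(lines)
--     start = max(0, total - 1000)
--     for i in range(total - 1, start - 1, -1):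
--         lower = lines[i].strip().lower()
--         if any(lower.startswith(p) for p in _END_OF_PROJECT_PREFIXES):
--             return lines[:i]
--     return lines
-- ===== SOURCE B (Python) =====
-- _END_OF_PROJECT_PREFIXES = (
--     "end of project",
--     "end of the project",
-- )
--
-- def _is_end(line):
--     low = line.strip().lower()
--     return any(low.startswith(p) for p in _END_OF_PROJECT_PREFIXES)
--
-- def _strip_end_of_project(lines: list[str]) -> list[str]:
--     """Staged: collect ALL matching indices of the last-1000-line window with a
--     filter comprehension over the enumerated slice, then truncate at the last one."""
--     start = max(0, len(lines) - 1000)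
--     hits = [i for i, line in enumerate(lines[start:], start) if _is_end(line)]
--     return lines[:hits[-1]] if hits else lines
-- ===== Notes on version B (the rewrite author's own statement) =====
-- stated objective: alternative
-- what changed: Replaces A's backward index loop with early return by two staged passes: a filter comprehension over the enumerated window slice collecting all matching indices, then truncation at the last collected index (no backward scan, no early exit, no direct indexing into lines).
import Mathlib
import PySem

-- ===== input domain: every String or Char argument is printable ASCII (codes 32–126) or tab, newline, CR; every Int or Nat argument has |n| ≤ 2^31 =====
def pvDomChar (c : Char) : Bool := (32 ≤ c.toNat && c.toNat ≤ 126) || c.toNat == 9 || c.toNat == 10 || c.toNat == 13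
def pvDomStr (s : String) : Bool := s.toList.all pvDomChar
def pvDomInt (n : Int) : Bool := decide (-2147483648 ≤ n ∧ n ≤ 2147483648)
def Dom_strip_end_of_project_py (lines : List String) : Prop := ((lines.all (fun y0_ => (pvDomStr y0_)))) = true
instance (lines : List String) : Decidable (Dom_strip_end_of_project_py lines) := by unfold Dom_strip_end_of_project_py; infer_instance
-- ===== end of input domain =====

-- B replaces A's backward early-return scan by two staged passes: a filter over the enumerated window slice collecting all matching indices, then truncation at the last one (alternative decomposition, same cost).


-- ===== PORT A =====
def endOfProjectPrefixes : List String := ["end of project", "end of the project"]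

-- A's inline condition: 'any(lines[i].strip().lower().startswith(p) for p in _END_OF_PROJECT_PREFIXES)'
def pvHitA (lines : List String) (i : Int) : Bool :=
  endOfProjectPrefixes.any (fun p =>
    PySem.Str.startswith (PySem.Str.lower (PySem.Str.strip (PySem.List.pyGetD lines i ""))) p)

-- backward loop with early return: 'for i in range(total-1, start-1, -1): … return lines[:i]'
def stripLoopA (lines : List String) (idxs : List Int) : List String :=
  match idxs with
  | [] => lines
  | i :: rest =>
    if pvHitA lines i then PySem.List.slice lines none (some i)
    else stripLoopA lines rest

def strip_end_of_project_py (lines : List String) : List String :=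
  let total := PySem.List.len lines
  let start := max 0 (total - 1000)
  stripLoopA lines (PySem.List.pyRange (total - 1) (start - 1) (-1))

-- ===== PORT B =====
-- B's helper '_is_end(line)'
def pvIsEnd (line : String) : Bool :=
  endOfProjectPrefixes.any (fun p =>
    PySem.Str.startswith (PySem.Str.lower (PySem.Str.strip line)) p)

-- '[i for i, line in enumerate(lines[start:], start) if _is_end(line)]', then 'lines[:hits[-1]] if hits else lines'
def strip_end_of_project_py_alt (lines : List String) : List String :=
  let start := max 0 (PySem.List.len lines - 1000)
  let hits : List Int :=
    (PySem.List.enumerate (PySem.List.slice lines (some start) none) start).filterMap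
      (fun il => if pvIsEnd il.2 then some il.1 else none)
  match hits.getLast? with
  | none => lines
  | some i => PySem.List.slice lines none (some i)

-- ===== PRECONDITION & SPEC =====
def Spec_strip_end_of_project_py (lines : List String) (out : List String) : Prop := out = strip_end_of_project_py_alt lines
instance (lines : List String) (out : List String) : Decidable (Spec_strip_end_of_project_py lines out) := by unfold Spec_strip_end_of_project_py; infer_instance

-- ===== CLAIM (what is proved, stated in full; the proofs are below) =====
def Claim_equal_strip_end_of_project_py : Prop := ∀ (lines : List String), Dom_strip_end_of_project_py lines → Spec_strip_end_of_project_py lines (strip_end_of_project_py lines)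

-- ===== LEMMAS AND PROOFS =====

-- A's early-return loop is "slice at the first hit of the index list"
lemma stripLoopA_eq_find? (lines : List String) (ds : List Int) :
    stripLoopA lines ds =
      match ds.find? (pvHitA lines) with
      | none => lines
      | some i => PySem.List.slice lines none (some i) := by
  induction ds with
  | nil => rfl
  | cons d rest ih =>
    simp only [stripLoopA, List.find?_cons]
    by_cases h : pvHitA lines d = true
    · simp only [h, if_true]
    · simp only [h, if_false, Bool.false_eq_true, ih]

-- B's staged comprehension over the enumerated tail equals a filter of the ascending index range
lemma hits_eq_filter (lines : List String) (a : Int) (h0 : 0 ≤ a) :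
    (PySem.List.enumerate (lines.drop a.toNat) a).filterMap
        (fun il => if pvIsEnd il.2 then some il.1 else none)
      = (PySem.List.pyRange a (PySem.List.len lines) 1).filter (pvHitA lines) := by
  have key : ∀ (n : Nat) (a : Int), 0 ≤ a → lines.length - a.toNat = n →
      (PySem.List.enumerate (lines.drop a.toNat) a).filterMap
          (fun il => if pvIsEnd il.2 then some il.1 else none)
        = (PySem.List.pyRange a (PySem.List.len lines) 1).filter (pvHitA lines) := by
    intro n
    induction n with
    | zero =>
      intro a ha hn
      have hge : lines.length ≤ a.toNat := by omega
      have h1 : lines.drop a.toNat = [] := List.drop_eq_nil_of_le hge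
      have h2 : PySem.List.pyRange a (PySem.List.len lines) 1 = [] := by
        apply PySem.List.pyRange_one_eq_nil
        simp [PySem.List.len]
        omega
      rw [h1, h2, PySem.List.enumerate_nil]
      simp
    | succ n ih =>
      intro a ha hn
      have hlt : a.toNat < lines.length := by omega
      have hltI : a < (lines.length : Int) := by omega
      have hdrop : lines.drop a.toNat = lines[a.toNat] :: lines.drop (a.toNat + 1) :=
        List.drop_eq_getElem_cons hlt
      have hrange : PySem.List.pyRange a (PySem.List.len lines) 1
          = a :: PySem.List.pyRange (a + 1) (PySem.List.len lines) 1 := by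
        apply PySem.List.pyRange_one_cons
        simpa [PySem.List.len] using hltI
      have htn : (a + 1).toNat = a.toNat + 1 := by omega
      have hih := ih (a + 1) (by omega) (by omega)
      rw [htn] at hih
      have hhit : pvHitA lines a = pvIsEnd lines[a.toNat] := by
        have hg : PySem.List.pyGetD lines a "" = lines[a.toNat] :=
          PySem.List.pyGetD_eq_getElem lines "" ha (by simpa using hltI)
        simp [pvHitA, pvIsEnd, hg]
      rw [hdrop, hrange, PySem.List.enumerate_cons]
      by_cases h : pvIsEnd lines[a.toNat] = true
      · simp only [List.filterMap_cons, List.filter_cons, h, if_true, hhit, hih]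
      · simp only [List.filterMap_cons, List.filter_cons, h, if_false, hhit,
          Bool.false_eq_true, hih]
  exact key (lines.length - a.toNat) a h0 rfl

theorem strip_end_of_project_py_spec : Claim_equal_strip_end_of_project_py := by
  intro lines _
  unfold Spec_strip_end_of_project_py strip_end_of_project_py strip_end_of_project_py_alt
  simp only []
  have hs : (0 : Int) ≤ max 0 (PySem.List.len lines - 1000) := le_max_left _ _
  rw [PySem.List.slice_from _ hs, hits_eq_filter lines _ hs, stripLoopA_eq_find?]
  have hrev : PySem.List.pyRange (PySem.List.len lines - 1) (max 0 (PySem.List.len lines - 1000) - 1) (-1)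
      = (PySem.List.pyRange (max 0 (PySem.List.len lines - 1000)) (PySem.List.len lines) 1).reverse := by
    rw [PySem.List.pyRange_neg_one_eq_reverse]
    have e1 : max 0 (PySem.List.len lines - 1000) - 1 + 1 = max 0 (PySem.List.len lines - 1000) := by omega
    have e2 : PySem.List.len lines - 1 + 1 = PySem.List.len lines := by omega
    rw [e1, e2]
  rw [hrev, ← List.head?_filter, List.filter_reverse, List.head?_reverse]
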